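-- pv_equiv track=rewrite | github.com/barrettwj/barrettwj.github.io | Oracle_SDM_Integer_Mark_I.py | vector
-- ===== SOURCE A (Python) =====
-- def vector(n_in, dim_in):
--     n = n_in
--     out = []
--     while (n > 0):
--         n, digit = divmod(n, 10)
--         out.append(digit)
--     while (len(out) < dim_in): out.append(0)
--     return out.copy()
-- ===== SOURCE B (Python) =====
-- def vector(n_in, dim_in):
--     digits = [ord(c) - 48 for c in str(n_in)[::-1]] if n_in > 0 else []
--     return digits + [0] * (dim_in - len(digits))
-- ===== Notes on version B (the rewrite author's own statement) =====
-- stated objective: idiomatic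
-- what changed: B converts the number once via str() and maps its reversed characters to digit values, then pads with list multiplication, replacing A's divmod loop and its element-by-element padding loop.
import Mathlib
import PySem

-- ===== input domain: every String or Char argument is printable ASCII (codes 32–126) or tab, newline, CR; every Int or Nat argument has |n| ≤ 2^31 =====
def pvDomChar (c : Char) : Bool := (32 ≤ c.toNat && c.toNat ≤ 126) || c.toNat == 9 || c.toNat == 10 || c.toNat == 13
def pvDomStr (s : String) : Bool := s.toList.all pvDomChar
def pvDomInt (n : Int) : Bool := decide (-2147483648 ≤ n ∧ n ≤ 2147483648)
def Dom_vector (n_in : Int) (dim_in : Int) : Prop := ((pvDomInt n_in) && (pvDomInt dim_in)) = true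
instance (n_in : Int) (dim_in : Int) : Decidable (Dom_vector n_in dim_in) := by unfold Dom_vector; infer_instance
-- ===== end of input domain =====

-- B replaces A's divmod loop and element-by-element padding by a single str() conversion
-- mapped to digit values plus list multiplication (objective: idiomatic; same cost).

-- ===== PORT A =====
-- while (n > 0): n, digit = divmod(n, 10); out.append(digit)
def vecLoopA (n : Int) : List Int :=
  if _h : 0 < n then
    PySem.Int.mod n 10 :: vecLoopA (PySem.Int.floordiv n 10)
  else []
termination_by n.toNat
decreasing_by
  have h10 : (0:Int) < 10 := by omega
  rw [PySem.Int.floordiv_eq_ediv_of_pos h10]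
  omega

-- while (len(out) < dim_in): out.append(0)
def vecPadA (out : List Int) (dim : Int) : List Int :=
  if h : (out.length : Int) < dim then vecPadA (out ++ [0]) dim else out
termination_by (dim - out.length).toNat
decreasing_by simp; omega

def vector (n_in : Int) (dim_in : Int) : List Int :=
  vecPadA (vecLoopA n_in) dim_in

-- ===== PORT B =====
def vector_alt (n_in : Int) (dim_in : Int) : List Int :=
  let digits :=
    if 0 < n_in then
      ((PySem.Int.toChars n_in).reverse).map (fun c => (c.toNat : Int) - 48)
    else []
  digits ++ List.replicate (dim_in - digits.length).toNat 0

-- ===== PRECONDITION & SPEC =====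
def Spec_vector (n_in : Int) (dim_in : Int) (out : List Int) : Prop := out = vector_alt n_in dim_in
instance (n_in : Int) (dim_in : Int) (out : List Int) : Decidable (Spec_vector n_in dim_in out) := by unfold Spec_vector; infer_instance

-- ===== CLAIM (what is proved, stated in full; the proofs are below) =====
def Claim_equal_vector : Prop := ∀ (n_in : Int) (dim_in : Int), Dom_vector n_in dim_in → Spec_vector n_in dim_in (vector n_in dim_in)

-- ===== LEMMAS AND PROOFS =====

-- A's digit loop produces exactly Nat.digits (least-significant first), as Ints.
lemma vecLoopA_eq_digits (n : Int) :
    vecLoopA n = (Nat.digits 10 n.toNat).map (fun d => Int.ofNat d) := by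
  by_cases h : 0 < n
  · obtain ⟨m, rfl⟩ : ∃ m : Nat, n = (m : Int) := ⟨n.toNat, by omega⟩
    have hm : 0 < m := by exact_mod_cast h
    induction m using Nat.strong_induction_on with
    | _ m ih =>
      rw [vecLoopA]
      simp only [h, dite_true]
      have hdiv : PySem.Int.floordiv (m : Int) 10 = ((m / 10 : Nat) : Int) := by
        exact_mod_cast PySem.Int.floordiv_natCast m 10
      have hmod : PySem.Int.mod (m : Int) 10 = ((m % 10 : Nat) : Int) := by
        exact_mod_cast PySem.Int.mod_natCast m 10
      rw [hdiv, hmod, Int.toNat_natCast, Nat.digits_def' (by norm_num : 1 < 10) hm]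
      rw [List.map_cons]
      congr 1
      by_cases hq : 0 < m / 10
      · exact ih (m / 10) (Nat.div_lt_self hm (by norm_num)) (by exact_mod_cast hq) hq
      · have h0 : m / 10 = 0 := by omega
        rw [vecLoopA]
        simp [h0]
  · rw [vecLoopA]
    have : n.toNat = 0 := by omega
    simp [h, this]

-- Nat.toDigitsCore unfolds to the reversed digit characters when fuel suffices.
lemma toDigitsCore_eq (n : Nat) (hn : 0 < n) :
    ∀ fuel ds, n < fuel →
      Nat.toDigitsCore 10 fuel n ds =
        ((Nat.digits 10 n).map Nat.digitChar).reverse ++ ds := by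
  induction n using Nat.strong_induction_on with
  | _ n ih =>
    intro fuel ds hf
    match fuel with
    | 0 => omega
    | f + 1 =>
      rw [Nat.toDigitsCore]
      rw [Nat.digits_def' (by norm_num : 1 < 10) hn]
      by_cases hq : n / 10 = 0
      · simp [hq, Nat.digits]
      · have hlt : n / 10 < n := Nat.div_lt_self hn (by norm_num)
        rw [if_neg hq, ih (n / 10) hlt (Nat.pos_of_ne_zero hq) f _ (by omega)]
        simp

lemma digitChar_toNat (d : Nat) (hd : d < 10) : (Nat.digitChar d).toNat = d + 48 := by
  interval_cases d <;> decide

-- B's string path yields the same digit list as A's loop.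
lemma alt_digits_eq (n : Int) (h : 0 < n) :
    ((PySem.Int.toChars n).reverse).map (fun c => (c.toNat : Int) - 48) = vecLoopA n := by
  have hn : 0 < n.toNat := by omega
  rw [vecLoopA_eq_digits]
  have hneg : ¬ n < 0 := by omega
  rw [PySem.Int.toChars]
  rw [if_neg hneg, Nat.toDigits,
      toDigitsCore_eq n.toNat hn (n.toNat + 1) [] (by omega)]
  simp only [List.append_nil, List.reverse_reverse, List.map_map]
  apply List.map_congr_left
  intro d hd
  have : d < 10 := Nat.digits_lt_base (by norm_num) hd
  simp [Function.comp, digitChar_toNat d this]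

-- A's padding loop is appending the right number of zeros.
lemma vecPadA_eq (out : List Int) (dim : Int) :
    vecPadA out dim = out ++ List.replicate (dim - out.length).toNat 0 := by
  by_cases h : (out.length : Int) < dim
  · obtain ⟨k, hk⟩ : ∃ k : Nat, (dim - out.length).toNat = k := ⟨_, rfl⟩
    induction k generalizing out with
    | zero => omega
    | succ k ih =>
      rw [vecPadA, dif_pos h]
      by_cases h' : ((out ++ [0]).length : Int) < dim
      · rw [ih (out ++ [0]) h' (by simp; omega)]
        have h1 : (dim - ↑out.length).toNat = k + 1 := hk
        have h2 : (dim - ↑(out ++ [0]).length).toNat = k := by simp; omega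
        rw [h2, h1]
        simp [List.replicate_succ]
      · rw [vecPadA, dif_neg h']
        have : (dim - ↑out.length).toNat = 1 := by simp at h'; omega
        simp [this]
  · rw [vecPadA, dif_neg h]
    have : (dim - out.length).toNat = 0 := by omega
    simp [this]

-- ===== VERDICT (by name: the statement is the Claim_ definition above) =====
theorem vector_spec : Claim_equal_vector := by
  intro n_in dim_in _
  show vector n_in dim_in = vector_alt n_in dim_in
  unfold vector vector_alt
  by_cases h : 0 < n_in
  · simp only [h, if_true]
    rw [alt_digits_eq n_in h, vecPadA_eq]
  · simp only [h, if_false]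
    have : vecLoopA n_in = [] := by rw [vecLoopA]; simp [h]
    rw [this, vecPadA_eq]
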